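-- pv_equiv track=rewrite | github.com/LeeChanghoJJang/Algorithm-Study | 11~20회차/19회차/programmers_92342_양궁대회/programmers_92342_임경태.py | solution
-- ===== SOURCE A (Python) =====
-- from itertools import product
--
-- def solution(n, info):
--     info.reverse()
--     max_diff = 0
--     ans = [-1]
--
--     # 모든 가능한 선택 조합을 반복
--     for win_comb in product((1, 0), repeat=11):
--         arrows = sum(info[i] + 1 for i in range(11) if win_comb[i])
--
--         # 선택 조합의 화살 수가 조건을 만족한다면
--         if arrows <= n:
--             A = sum(i for i in range(11) if not win_comb[i] and info[i])
--             R = sum(i for i in range(11) if win_comb[i])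
--             score_diff = R - A
--
--             # 최대 점수 차이 갱신
--             if max_diff < score_diff:
--                 max_diff = score_diff
--                 ans = [n - arrows] + [info[i] + 1 if win_comb[i] else 0 for i in range(1, 11)]
--
--     return ans[::-1]
-- ===== SOURCE B (Python) =====
-- def solution(n, info):
--     # Same in-place info.reverse() side effect as the original.
--     info.reverse()
--
--     # DFS over rings 0..10 (win branch first, matching product((1,0),...) order),
--     # carrying running arrow budget, score sums and the shot list instead of
--     # recomputing three full sums for every one of the 2^11 combinations.
--     def dfs(i, counts, left, r, a, shots, best):
--         if not counts:
--             diff = r - a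
--             if 0 <= left and best[0] < diff:
--                 return (diff, [left] + shots)
--             return best
--         cnt, rest = counts[0], counts[1:]
--         win_shot = [cnt + 1] if i >= 1 else []
--         lose_shot = [0] if i >= 1 else []
--         best = dfs(i + 1, rest, left - (cnt + 1), r + i, a, shots + win_shot, best)
--         return dfs(i + 1, rest, left, r, a + i if cnt else a, shots + lose_shot, best)
--
--     best = dfs(0, [info[i] for i in range(11)], n, 0, 0, [], (0, [-1]))
--     return best[1][::-1]
-- ===== Notes on version B (the rewrite author's own statement) =====
-- stated objective: alternative
-- what changed: Replaces the itertools.product loop that recomputes three full range(11) sums for each of the 2048 combinations by a recursive DFS over the rings (win branch first, matching product order) that carries the running arrow budget, both score sums and the shot list incrementally.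
import Mathlib
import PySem

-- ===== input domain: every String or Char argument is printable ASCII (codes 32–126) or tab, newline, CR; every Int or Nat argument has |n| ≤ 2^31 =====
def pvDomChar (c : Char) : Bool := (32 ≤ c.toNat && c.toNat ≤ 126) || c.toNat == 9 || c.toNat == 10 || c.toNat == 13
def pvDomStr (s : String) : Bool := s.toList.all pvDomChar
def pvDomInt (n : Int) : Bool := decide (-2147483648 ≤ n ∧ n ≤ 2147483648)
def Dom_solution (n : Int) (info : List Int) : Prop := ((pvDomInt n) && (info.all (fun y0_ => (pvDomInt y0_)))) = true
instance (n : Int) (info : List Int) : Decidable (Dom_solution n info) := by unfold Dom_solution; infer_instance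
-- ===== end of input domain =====

-- B replaces the product-of-tuples loop (three range(11) sums recomputed per combination) by a
-- DFS over the rings carrying running sums; equivalence is about the return value — both
-- Pythons also perform the same in-place info.reverse() on the argument.

-- ===== PORT A =====

-- Python xs[i] for the nonnegative indices of range(11); out-of-range (IndexError) is excluded
-- by Pre_solution (11 ≤ info.length), and every win_comb has exactly 11 entries.
def pvIdx (xs : List Int) (i : Nat) : Int := (xs[i]?).getD 0

-- product((1, 0), repeat=k): first coordinate varies slowest, 1 before 0.
def pvProd : Nat → List (List Int)
  | 0 => [[]]
  | k + 1 => [(1 : Int), 0].flatMap (fun v => (pvProd k).map (fun c => v :: c))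

def solution (n : Int) (info : List Int) : List Int :=
  let info := info.reverse
  let st := (pvProd 11).foldl (fun (st : Int × List Int) comb =>
    let arrows := (List.range 11).foldl
      (fun s i => if pvIdx comb i ≠ 0 then s + (pvIdx info i + 1) else s) 0
    if arrows ≤ n then
      let A := (List.range 11).foldl
        (fun s i => if pvIdx comb i = 0 ∧ pvIdx info i ≠ 0 then s + (i : Int) else s) 0
      let R := (List.range 11).foldl
        (fun s i => if pvIdx comb i ≠ 0 then s + (i : Int) else s) 0
      let score_diff := R - A
      if st.1 < score_diff then
        (score_diff,
          (n - arrows) :: (List.range' 1 10).map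
            (fun i => if pvIdx comb i ≠ 0 then pvIdx info i + 1 else 0))
      else st
    else st) (0, [-1])
  st.2.reverse

-- ===== PORT B =====

def dfsB : Nat → List Int → Int → Int → Int → List Int → Int × List Int → Int × List Int
  | _, [], left, r, a, shots, best =>
      let diff := r - a
      if 0 ≤ left ∧ best.1 < diff then (diff, left :: shots) else best
  | i, cnt :: rest, left, r, a, shots, best =>
      let winShot := if 1 ≤ i then [cnt + 1] else []
      let loseShot := if 1 ≤ i then [(0 : Int)] else []
      let best := dfsB (i + 1) rest (left - (cnt + 1)) (r + (i : Int)) a (shots ++ winShot) best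
      dfsB (i + 1) rest left r (if cnt ≠ 0 then a + (i : Int) else a) (shots ++ loseShot) best

-- [info[i] for i in range(11)] raises IndexError on short lists (excluded by Pre_solution,
-- where the default 0 of pvIdx is never taken).
def solution_alt (n : Int) (info : List Int) : List Int :=
  let info := info.reverse
  (dfsB 0 ((List.range 11).map (fun i => pvIdx info i)) n 0 0 [] (0, [-1])).2.reverse

-- ===== PRECONDITION & SPEC =====
-- Python A indexes info[i] for i in range(11), so it raises IndexError on lists shorter than 11;
-- Pre_ excludes exactly those inputs (B returns a value there instead).
def Pre_solution (n : Int) (info : List Int) : Prop := 11 ≤ info.length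
instance (n : Int) (info : List Int) : Decidable (Pre_solution n info) := by unfold Pre_solution; infer_instance
def pvWitness_solution : Int × List Int := (9, [2, 1, 1, 1, 0, 0, 0, 0, 0, 0, 0])

def Spec_solution (n : Int) (info : List Int) (out : List Int) : Prop := out = solution_alt n info
instance (n : Int) (info : List Int) (out : List Int) : Decidable (Spec_solution n info out) := by unfold Spec_solution; infer_instance

-- ===== CLAIM (what is proved, stated in full; the proofs are below) =====
def Claim_equal_solution : Prop := ∀ (n : Int) (info : List Int), Dom_solution n info → Pre_solution n info → Spec_solution n info (solution n info)

-- ===== LEMMAS AND PROOFS =====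

-- Leaf update of the DFS (also the body of A's loop once its sums are named).
def pvLeaf (left r a : Int) (shots : List Int) (b : Int × List Int) : Int × List Int :=
  if 0 ≤ left ∧ b.1 < r - a then (r - a, left :: shots) else b

-- Generic accumulated sum over (ring index, chosen bit, ring count) triples.
def accF (g : Nat → Int → Int → Int) : Nat → List Int → List Int → Int
  | _, [], _ => 0
  | _, _ :: _, [] => 0
  | i, cnt :: rest, c :: s => g i c cnt + accF g (i + 1) rest s

def costF : Nat → List Int → List Int → Int := accF (fun _ c cnt => if c ≠ 0 then cnt + 1 else 0)
def rsumF : Nat → List Int → List Int → Int := accF (fun i c _ => if c ≠ 0 then (i : Int) else 0)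
def asumF : Nat → List Int → List Int → Int := accF (fun i c cnt => if c = 0 ∧ cnt ≠ 0 then (i : Int) else 0)

def shF : Nat → List Int → List Int → List Int
  | _, [], _ => []
  | _, _ :: _, [] => []
  | i, cnt :: rest, c :: s =>
      (if 1 ≤ i then [if c ≠ 0 then cnt + 1 else (0 : Int)] else []) ++ shF (i + 1) rest s

theorem pvIdx_cons_zero (x : Int) (xs : List Int) : pvIdx (x :: xs) 0 = x := by simp [pvIdx]
theorem pvIdx_cons_succ (x : Int) (xs : List Int) (k : Nat) : pvIdx (x :: xs) (k + 1) = pvIdx xs k := by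
  simp [pvIdx]

theorem length_mem_pvProd {k : Nat} {s : List Int} (h : s ∈ pvProd k) : s.length = k := by
  induction k generalizing s with
  | zero => simp [pvProd] at h; simp [h]
  | succ k ih =>
    simp [pvProd] at h
    rcases h with ⟨c, hc, rfl⟩ | ⟨c, hc, rfl⟩ <;> simp [ih hc]

theorem pvProd_succ (k : Nat) :
    pvProd (k + 1) = (pvProd k).map (fun c => (1 : Int) :: c) ++ (pvProd k).map (fun c => (0 : Int) :: c) := by
  simp [pvProd]

-- The DFS equals a fold of pvLeaf over all 0/1 combinations, in product order.
theorem dfsB_eq_foldl (counts : List Int) :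
    ∀ (i : Nat) (left r a : Int) (shots : List Int) (best : Int × List Int),
    dfsB i counts left r a shots best
      = (pvProd counts.length).foldl
          (fun b s => pvLeaf (left - costF i counts s) (r + rsumF i counts s)
            (a + asumF i counts s) (shots ++ shF i counts s) b) best := by
  induction counts with
  | nil =>
    intro i left r a shots best
    simp [dfsB, pvProd, pvLeaf, costF, rsumF, asumF, accF, shF]
  | cons cnt rest ih =>
    intro i left r a shots best
    rw [show (cnt :: rest).length = rest.length + 1 from rfl, pvProd_succ,
      List.foldl_append, List.foldl_map, List.foldl_map]
    show dfsB i (cnt :: rest) left r a shots best = _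
    rw [dfsB]
    rw [ih, ih]
    have c1 : ∀ s : List Int, left - costF i (cnt :: rest) (1 :: s) = left - (cnt + 1) - costF (i + 1) rest s := by
      intro s; simp [costF, accF]; ring
    have c2 : ∀ s : List Int, r + rsumF i (cnt :: rest) (1 :: s) = r + (i : Int) + rsumF (i + 1) rest s := by
      intro s; simp [rsumF, accF]; ring
    have c3 : ∀ s : List Int, a + asumF i (cnt :: rest) (1 :: s) = a + asumF (i + 1) rest s := by
      intro s; simp [asumF, accF]
    have c4 : ∀ s : List Int, shots ++ shF i (cnt :: rest) (1 :: s)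
        = (shots ++ (if 1 ≤ i then [cnt + 1] else [])) ++ shF (i + 1) rest s := by
      intro s; simp [shF, List.append_assoc]
    have d1 : ∀ s : List Int, left - costF i (cnt :: rest) (0 :: s) = left - costF (i + 1) rest s := by
      intro s; simp [costF, accF]
    have d2 : ∀ s : List Int, r + rsumF i (cnt :: rest) (0 :: s) = r + rsumF (i + 1) rest s := by
      intro s; simp [rsumF, accF]
    have d3 : ∀ s : List Int, a + asumF i (cnt :: rest) (0 :: s)
        = (if cnt ≠ 0 then a + (i : Int) else a) + asumF (i + 1) rest s := by
      intro s; by_cases h : cnt = 0 <;> simp [asumF, accF, h] <;> ring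
    have d4 : ∀ s : List Int, shots ++ shF i (cnt :: rest) (0 :: s)
        = (shots ++ (if 1 ≤ i then [(0 : Int)] else [])) ++ shF (i + 1) rest s := by
      intro s; simp [shF, List.append_assoc]
    have H1 : List.foldl (fun (x : Int × List Int) (y : List Int) =>
          pvLeaf (left - costF i (cnt :: rest) (1 :: y)) (r + rsumF i (cnt :: rest) (1 :: y))
            (a + asumF i (cnt :: rest) (1 :: y)) (shots ++ shF i (cnt :: rest) (1 :: y)) x)
          best (pvProd rest.length)
        = List.foldl (fun x y =>
          pvLeaf (left - (cnt + 1) - costF (i + 1) rest y) (r + (i : Int) + rsumF (i + 1) rest y)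
            (a + asumF (i + 1) rest y)
            ((shots ++ (if 1 ≤ i then [cnt + 1] else [])) ++ shF (i + 1) rest y) x) best (pvProd rest.length) := by
      apply PySem.List.foldl_congr_mem
      intro acc s _
      rw [c1, c2, c3, c4]
    have H2 : ∀ init : Int × List Int, List.foldl (fun (x : Int × List Int) (y : List Int) =>
          pvLeaf (left - costF i (cnt :: rest) (0 :: y)) (r + rsumF i (cnt :: rest) (0 :: y))
            (a + asumF i (cnt :: rest) (0 :: y)) (shots ++ shF i (cnt :: rest) (0 :: y)) x)
          init (pvProd rest.length)
        = List.foldl (fun x y =>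
          pvLeaf (left - costF (i + 1) rest y) (r + rsumF (i + 1) rest y)
            ((if cnt ≠ 0 then a + (i : Int) else a) + asumF (i + 1) rest y)
            ((shots ++ (if 1 ≤ i then [(0 : Int)] else [])) ++ shF (i + 1) rest y) x) init (pvProd rest.length) := by
      intro init
      apply PySem.List.foldl_congr_mem
      intro acc s _
      rw [d1, d2, d3, d4]
    rw [H1, H2]

-- Fold over range' reading both lists through pvIdx equals the structural accF.
theorem accF_fold (g : Nat → Int → Int → Int) (cs : List Int) :
    ∀ (ss : List Int) (i : Nat) (acc : Int), ss.length = cs.length →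
    (List.range' i cs.length).foldl (fun t j => t + g j (pvIdx ss (j - i)) (pvIdx cs (j - i))) acc
      = acc + accF g i cs ss := by
  induction cs with
  | nil => intro ss i acc _; simp [accF]
  | cons cnt rest ih =>
    intro ss i acc hlen
    cases ss with
    | nil => simp at hlen
    | cons c s =>
      simp only [List.length_cons] at hlen ⊢
      rw [List.range'_succ, List.foldl_cons]
      have h1 : (List.range' (i + 1) rest.length).foldl
          (fun t j => t + g j (pvIdx (c :: s) (j - i)) (pvIdx (cnt :: rest) (j - i)))
          (acc + g i (pvIdx (c :: s) (i - i)) (pvIdx (cnt :: rest) (i - i)))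
          = (List.range' (i + 1) rest.length).foldl
          (fun t j => t + g j (pvIdx s (j - (i + 1))) (pvIdx rest (j - (i + 1))))
          (acc + g i c cnt) := by
        have : i - i = 0 := by omega
        rw [this, pvIdx_cons_zero, pvIdx_cons_zero]
        apply PySem.List.foldl_congr_mem
        intro t j hj
        have hij : i + 1 ≤ j := (List.mem_range'_1.mp hj).1
        have e : j - i = (j - (i + 1)) + 1 := by omega
        rw [e, pvIdx_cons_succ, pvIdx_cons_succ]
      rw [h1, ih s (i + 1) _ (by omega)]
      simp [accF, add_assoc]

theorem shF_map (cs : List Int) :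
    ∀ (ss : List Int) (i : Nat), ss.length = cs.length → 1 ≤ i →
    shF i cs ss = (List.range' i cs.length).map
      (fun j => if pvIdx ss (j - i) ≠ 0 then pvIdx cs (j - i) + 1 else 0) := by
  induction cs with
  | nil => intro ss i _ _; simp [shF]
  | cons cnt rest ih =>
    intro ss i hlen hi
    cases ss with
    | nil => simp at hlen
    | cons c s =>
      simp only [List.length_cons] at hlen ⊢
      rw [List.range'_succ, List.map_cons]
      have : i - i = 0 := by omega
      rw [shF, if_pos hi, this, pvIdx_cons_zero, pvIdx_cons_zero,
        ih s (i + 1) (by omega) (by omega)]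
      rw [List.singleton_append]
      congr 1
      refine List.map_congr_left ?_
      intro j hj
      have hij : i + 1 ≤ j := (List.mem_range'_1.mp hj).1
      have e : j - i = (j - (i + 1)) + 1 := by omega
      rw [e, pvIdx_cons_succ, pvIdx_cons_succ]

-- pvIdx through take for indices below the cut.
theorem pvIdx_take (xs : List Int) (m j : Nat) (h : j < m) : pvIdx (xs.take m) j = pvIdx xs j := by
  simp [pvIdx, h]

-- Per-combination bridge: A's three range(11) sums and its answer tail are the structural
-- costF/rsumF/asumF/shF over the first 11 counts.
theorem key_fold (xs comb : List Int) (h : 11 ≤ xs.length) (hc : comb.length = 11)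
    (g : Nat → Int → Int → Int) (acc : Int) :
    (List.range' 0 11).foldl (fun t j => t + g j (pvIdx comb j) (pvIdx (xs.take 11) j)) acc
      = acc + accF g 0 (xs.take 11) comb := by
  have hcl : (xs.take 11).length = 11 := by simp; omega
  have := accF_fold g (xs.take 11) comb 0 acc (by omega)
  simpa [hcl] using this

theorem arrows_eq (xs comb : List Int) (h : 11 ≤ xs.length) (hc : comb.length = 11) :
    (List.range 11).foldl (fun s j => if pvIdx comb j ≠ 0 then s + (pvIdx xs j + 1) else s) 0
      = costF 0 (xs.take 11) comb := by
  rw [List.range_eq_range']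
  have h1 : (List.range' 0 11).foldl (fun s j => if pvIdx comb j ≠ 0 then s + (pvIdx xs j + 1) else s) 0
      = (List.range' 0 11).foldl
        (fun t j => t + (fun _ c cnt => if c ≠ 0 then cnt + 1 else 0) j (pvIdx comb j) (pvIdx (xs.take 11) j)) 0 := by
    apply PySem.List.foldl_congr_mem
    intro acc j hj
    have hj11 : j < 11 := by have := List.mem_range'_1.mp hj; omega
    rw [pvIdx_take xs 11 j hj11]
    by_cases hcb : pvIdx comb j = 0 <;> simp [hcb]
  rw [h1, key_fold xs comb h hc (fun _ c cnt => if c ≠ 0 then cnt + 1 else 0) 0]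
  simp [costF]

theorem rsum_eq (xs comb : List Int) (h : 11 ≤ xs.length) (hc : comb.length = 11) :
    (List.range 11).foldl (fun s j => if pvIdx comb j ≠ 0 then s + (j : Int) else s) 0
      = rsumF 0 (xs.take 11) comb := by
  rw [List.range_eq_range']
  have h1 : (List.range' 0 11).foldl (fun s j => if pvIdx comb j ≠ 0 then s + (j : Int) else s) 0
      = (List.range' 0 11).foldl
        (fun t j => t + (fun (j : Nat) (c _ : Int) => if c ≠ 0 then (j : Int) else 0) j (pvIdx comb j) (pvIdx (xs.take 11) j)) 0 := by
    apply PySem.List.foldl_congr_mem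
    intro acc j hj
    by_cases hcb : pvIdx comb j = 0 <;> simp [hcb]
  rw [h1, key_fold xs comb h hc (fun (j : Nat) (c _ : Int) => if c ≠ 0 then (j : Int) else 0) 0]
  simp [rsumF]

theorem asum_eq (xs comb : List Int) (h : 11 ≤ xs.length) (hc : comb.length = 11) :
    (List.range 11).foldl (fun s j => if pvIdx comb j = 0 ∧ pvIdx xs j ≠ 0 then s + (j : Int) else s) 0
      = asumF 0 (xs.take 11) comb := by
  rw [List.range_eq_range']
  have h1 : (List.range' 0 11).foldl (fun s j => if pvIdx comb j = 0 ∧ pvIdx xs j ≠ 0 then s + (j : Int) else s) 0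
      = (List.range' 0 11).foldl
        (fun t j => t + (fun (j : Nat) (c cnt : Int) => if c = 0 ∧ cnt ≠ 0 then (j : Int) else 0) j (pvIdx comb j) (pvIdx (xs.take 11) j)) 0 := by
    apply PySem.List.foldl_congr_mem
    intro acc j hj
    have hj11 : j < 11 := by have := List.mem_range'_1.mp hj; omega
    by_cases h1b : pvIdx comb j = 0 <;> by_cases h2b : pvIdx xs j = 0 <;>
      simp [h1b, h2b, pvIdx_take xs 11 j hj11]
  rw [h1, key_fold xs comb h hc (fun (j : Nat) (c cnt : Int) => if c = 0 ∧ cnt ≠ 0 then (j : Int) else 0) 0]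
  simp [asumF]

theorem tail_eq (xs comb : List Int) (h : 11 ≤ xs.length) (hc : comb.length = 11) :
    (List.range' 1 10).map (fun j => if pvIdx comb j ≠ 0 then pvIdx xs j + 1 else 0)
      = shF 0 (xs.take 11) comb := by
  have hcl : (xs.take 11).length = 11 := by simp; omega
  cases hcounts : xs.take 11 with
  | nil => rw [hcounts] at hcl; simp at hcl
  | cons c0 ct =>
    cases comb with
    | nil => simp at hc
    | cons b0 bt =>
      have hct : ct.length = 10 := by rw [hcounts] at hcl; simpa using hcl
      have hbt : bt.length = 10 := by simpa using hc
      rw [shF]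
      simp only [show ¬ (1 ≤ 0) from by omega, if_false, List.nil_append]
      rw [shF_map ct bt 1 (by omega) (by omega), hct]
      refine List.map_congr_left ?_
      intro j hj
      have hj1 : 1 ≤ j ∧ j < 11 := by have := List.mem_range'_1.mp hj; omega
      have e : j = (j - 1) + 1 := by omega
      have hx : pvIdx xs j = pvIdx ct (j - 1) := by
        rw [← pvIdx_take xs 11 j hj1.2, hcounts, e, pvIdx_cons_succ]; simp
      have hb : pvIdx (b0 :: bt) j = pvIdx bt (j - 1) := by rw [e, pvIdx_cons_succ]; simp
      rw [hx, hb]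

-- On lists of length ≥ 11, indexing the first 11 entries is taking the first 11.
theorem counts_eq_take (xs : List Int) (h : 11 ≤ xs.length) :
    (List.range 11).map (fun i => pvIdx xs i) = xs.take 11 := by
  apply List.ext_getElem
  · simp; omega
  · intro k h1 h2
    simp only [List.getElem_map, List.getElem_range, List.getElem_take]
    have hk : k < 11 := by simpa using h1
    simp [pvIdx, List.getElem?_eq_getElem, show k < xs.length by omega]

-- ===== VERDICT (by name: the statement is the Claim_ definition above) =====
theorem solution_spec : Claim_equal_solution := by
  intro n info _ hpre
  unfold Pre_solution at hpre
  unfold Spec_solution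
  have hlen : 11 ≤ info.reverse.length := by simpa using hpre
  have hcl : (info.reverse.take 11).length = 11 := by simp; omega
  simp only [solution, solution_alt]
  rw [counts_eq_take info.reverse hlen, dfsB_eq_foldl, hcl]
  refine congrArg (fun st : Int × List Int => st.2.reverse) ?_
  apply PySem.List.foldl_congr_mem
  intro b comb hcomb
  have hc : comb.length = 11 := length_mem_pvProd hcomb
  rw [arrows_eq info.reverse comb hlen hc, rsum_eq info.reverse comb hlen hc,
    asum_eq info.reverse comb hlen hc, tail_eq info.reverse comb hlen hc]
  simp only [pvLeaf, zero_add, List.nil_append]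
  split_ifs <;> first | rfl | omega
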